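-- pv_equiv track=rewrite | github.com/AlisonDLovegood/PythonExercises | BSI/FPC1/semana_00/05_slide/for_exercises/task1.py | comissao
-- ===== SOURCE A (Python) =====
-- def comissao(q_pro_v, q_por_v):
--     for i in range(len(q_pro_v)):
--         if q_pro_v[i] <= 19:
--             q_por_v.append('10%')
--         elif q_pro_v[i] <= 49:
--             q_por_v.append('15%')
--         elif q_pro_v[i] <= 74:
--             q_por_v.append('20%')
--         else:
--             q_por_v.append('25%')
--     return q_por_v
-- ===== SOURCE B (Python) =====
-- def comissao(q_pro_v, q_por_v):
--     bounds = [19, 49, 74]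
--     labels = ['10%', '15%', '20%', '25%']
--
--     def bisect_left(a, x):
--         # index of the first element of sorted a that is >= x
--         lo, hi = 0, len(a)
--         while lo < hi:
--             mid = (lo + hi) // 2
--             if a[mid] < x:
--                 lo = mid + 1
--             else:
--                 hi = mid
--         return lo
--
--     q_por_v.extend(labels[bisect_left(bounds, v)] for v in q_pro_v)
--     return q_por_v
-- ===== Notes on version B (the rewrite author's own statement) =====
-- stated objective: alternative
-- what changed: Replaces the per-element if/elif threshold cascade with a binary search (hand-written bisect_left) into a sorted bounds table that indexes a parallel label table, appended via one extend.
import Mathlib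
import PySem

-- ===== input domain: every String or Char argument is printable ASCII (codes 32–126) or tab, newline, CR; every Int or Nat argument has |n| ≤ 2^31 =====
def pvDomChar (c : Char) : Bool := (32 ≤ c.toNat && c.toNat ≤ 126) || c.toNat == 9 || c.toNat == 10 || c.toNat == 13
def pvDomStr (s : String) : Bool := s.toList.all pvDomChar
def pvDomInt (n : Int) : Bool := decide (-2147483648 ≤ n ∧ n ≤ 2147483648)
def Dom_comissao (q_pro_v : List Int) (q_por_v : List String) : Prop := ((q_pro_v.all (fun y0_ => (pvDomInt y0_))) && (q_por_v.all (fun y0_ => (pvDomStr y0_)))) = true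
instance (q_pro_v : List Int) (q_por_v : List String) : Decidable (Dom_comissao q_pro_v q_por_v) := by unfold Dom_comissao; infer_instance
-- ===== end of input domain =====

-- B replaces the if/elif cascade with a binary search (bisect_left) into a sorted threshold table indexing a parallel label table (same cost, alternative algorithm); both mutate and return q_por_v.
-- ===== PORT A =====
def comissao (q_pro_v : List Int) (q_por_v : List String) : List String :=
  (PySem.List.pyRange 0 q_pro_v.length 1).foldl (fun acc i =>
    if PySem.List.pyGetD q_pro_v i 0 ≤ 19 then acc ++ ["10%"]
    else if PySem.List.pyGetD q_pro_v i 0 ≤ 49 then acc ++ ["15%"]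
    else if PySem.List.pyGetD q_pro_v i 0 ≤ 74 then acc ++ ["20%"]
    else acc ++ ["25%"]) q_por_v

-- ===== PORT B =====
-- bisect_left's while loop, ported as well-founded recursion on hi - lo; lo, hi, mid are
-- nonnegative throughout in Python, so Nat with Nat division (= Python's // here) is exact.
def bisectLoop (a : List Int) (x : Int) (lo hi : Nat) : Nat :=
  if _h : lo < hi then
    let mid := (lo + hi) / 2
    if PySem.List.pyGetD a (Int.ofNat mid) 0 < x then bisectLoop a x (mid + 1) hi
    else bisectLoop a x lo mid
  else lo
termination_by hi - lo
decreasing_by all_goals omega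

-- labels[idx]: idx = bisectLoop result is always ≤ len bounds = 3 < len labels, so getD is exact here.
def comissao_alt (q_pro_v : List Int) (q_por_v : List String) : List String :=
  q_por_v ++ q_pro_v.map (fun v =>
    ["10%", "15%", "20%", "25%"].getD (bisectLoop [19, 49, 74] v 0 3) "")

-- ===== PRECONDITION & SPEC =====
def Spec_comissao (q_pro_v : List Int) (q_por_v : List String) (out : List String) : Prop := out = comissao_alt q_pro_v q_por_v
instance (q_pro_v : List Int) (q_por_v : List String) (out : List String) : Decidable (Spec_comissao q_pro_v q_por_v out) := by unfold Spec_comissao; infer_instance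

-- ===== CLAIM (what is proved, stated in full; the proofs are below) =====
def Claim_equal_comissao : Prop := ∀ (q_pro_v : List Int) (q_por_v : List String), Dom_comissao q_pro_v q_por_v → Spec_comissao q_pro_v q_por_v (comissao q_pro_v q_por_v)

-- ===== LEMMAS AND PROOFS =====

lemma bisectLoop_eval (v : Int) :
    bisectLoop [19, 49, 74] v 0 3
      = if v ≤ 19 then 0 else if v ≤ 49 then 1 else if v ≤ 74 then 2 else 3 := by
  unfold bisectLoop; unfold bisectLoop; unfold bisectLoop; unfold bisectLoop
  simp [PySem.List.pyGetD, PySem.List.pyGet?, PySem.List.pyIdx?]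
  split_ifs <;> omega

lemma comissao_label (v : Int) :
    (if v ≤ 19 then ("10%" : String) else if v ≤ 49 then "15%" else if v ≤ 74 then "20%" else "25%")
      = ["10%", "15%", "20%", "25%"].getD (bisectLoop [19, 49, 74] v 0 3) "" := by
  rw [bisectLoop_eval]
  split_ifs <;> rfl

lemma comissao_fold (qs : List Int) (ps : List String) :
    qs.foldl (fun acc v =>
        if v ≤ 19 then acc ++ ["10%"]
        else if v ≤ 49 then acc ++ ["15%"]
        else if v ≤ 74 then acc ++ ["20%"]
        else acc ++ ["25%"]) ps
      = ps ++ qs.map (fun v =>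
          ["10%", "15%", "20%", "25%"].getD (bisectLoop [19, 49, 74] v 0 3) "") := by
  induction qs generalizing ps with
  | nil => simp
  | cons v t ih =>
    simp only [List.foldl_cons, List.map_cons]
    rw [ih, ← comissao_label v]
    split_ifs <;> simp

-- ===== VERDICT (by name: the statement is the Claim_ definition above) =====
theorem comissao_spec : Claim_equal_comissao := by
  intro qs ps _
  unfold Spec_comissao comissao comissao_alt
  rw [PySem.List.foldl_pyRange_zero_pyGetD' qs 0
    (fun acc v =>
      if v ≤ 19 then acc ++ ["10%"]
      else if v ≤ 49 then acc ++ ["15%"]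
      else if v ≤ 74 then acc ++ ["20%"]
      else acc ++ ["25%"]) ps]
  exact comissao_fold qs ps
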